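-- pv_equiv track=rewrite | github.com/ujjwal6792/team-15-energentic-hackathon | tool_agent/sub_agents/solar_service.py | _extract_provider_and_item_solar_service
-- ===== SOURCE A (Python) =====
-- provider_name_to_id = {
--     "Luminalt": "329",
--     "Sunrun": "330",
--     "Infinity Energy": "331",
--     "SolarUnion": "332",
--     "Horizon Solar Power": "333",
--     "San Francisco Electric Authority": "334", # Note: This provider might be duplicated if also in connection.py
-- }
--
-- provider_id_to_items = {
--     "329": {
--         "sp-resi-001": "466"
--     },
--     "330": {
--         "sp-resi-002": "467"
--     },
--     "331": {
--         "sp-resi-003": "468"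
--     },
--     "332": {
--         "sp-resi-004": "469"
--     },
--     "333": {
--         "sp-resi-005": "470"
--     },
--     "334": {
--         "Residential Electricity Connection6": "471" # Item name might need review for uniqueness/clarity
--     },
-- }
--
-- def _extract_provider_and_item_solar_service(search_query: str):
--     found_provider_name = None
--     found_item_name = None
--     search_query_lower = search_query.lower()
--
--     for p_name in provider_name_to_id.keys():
--         if p_name.lower() in search_query_lower:
--             found_provider_name = p_name
--             break
--
--     # Adjusted item search for solar_service structure
--     for p_id_map, items_map in provider_id_to_items.items():
--         for i_name in items_map.keys(): # i_name is like "sp-resi-001"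
--             if i_name.lower() in search_query_lower:
--                 found_item_name = i_name
--                 if found_provider_name and provider_name_to_id.get(found_provider_name) == p_id_map:
--                     break
--                 elif not found_provider_name:
--                     break
--         if found_item_name and (not found_provider_name or provider_name_to_id.get(found_provider_name) == p_id_map):
--             break
--
--     if not found_provider_name and not found_item_name:
--         return None, None, "Error: Could not identify a provider or item. Please specify provider (e.g., 'Luminalt') and item (e.g., 'sp-resi-001')."
--
--     if found_provider_name and not found_item_name:
--         provider_id_for_items = provider_name_to_id[found_provider_name]
--         available_items = list(provider_id_to_items.get(provider_id_for_items, {}).keys())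
--         if not available_items:
--             return None, None, f"Error: No items found for provider '{found_provider_name}'."
--         return None, None, f"Error: Please specify the item for provider '{found_provider_name}'. Available items: {', '.join(available_items)}."
--
--     if not found_provider_name and found_item_name:
--         possible_providers = []
--         for p_name, p_id_val in provider_name_to_id.items():
--             if found_item_name in provider_id_to_items.get(p_id_val, {}):
--                 possible_providers.append(p_name)
--         if possible_providers:
--             return None, None, f"Error: Please specify the provider for item '{found_item_name}'. This item is available from: {', '.join(possible_providers)}."
--         else:
--             return None, None, f"Error: Item '{found_item_name}' found, but no associated provider. Please also specify a provider name."
--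
--     provider_id = provider_name_to_id.get(found_provider_name)
--     item_id = provider_id_to_items.get(provider_id, {}).get(found_item_name)
--
--     if not item_id:
--         actual_items = list(provider_id_to_items.get(provider_id, {}).keys())
--         return None, None, (f"Error: Item '{found_item_name}' is not valid for provider '{found_provider_name}'. "
--                            f"Available items for this provider: {', '.join(actual_items) if actual_items else 'No items available'}.")
--
--     return provider_id, item_id, None
-- ===== SOURCE B (Python) =====
-- provider_name_to_id = {
--     "Luminalt": "329",
--     "Sunrun": "330",
--     "Infinity Energy": "331",
--     "SolarUnion": "332",
--     "Horizon Solar Power": "333",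
--     "San Francisco Electric Authority": "334",
-- }
--
-- provider_id_to_items = {
--     "329": {"sp-resi-001": "466"},
--     "330": {"sp-resi-002": "467"},
--     "331": {"sp-resi-003": "468"},
--     "332": {"sp-resi-004": "469"},
--     "333": {"sp-resi-005": "470"},
--     "334": {"Residential Electricity Connection6": "471"},
-- }
--
-- def _extract_provider_and_item_solar_service(search_query: str):
--     q = search_query.lower()
--     provider = next((p for p in provider_name_to_id if p.lower() in q), None)
--     matched = [name
--                for items in provider_id_to_items.values()
--                for name in items
--                if name.lower() in q]
--     if provider is None:
--         item = matched[0] if matched else None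
--     else:
--         pid = provider_name_to_id[provider]
--         own = next((n for n in provider_id_to_items.get(pid, {}) if n in matched), None)
--         item = own if own is not None else (matched[0] if matched else None)
--
--     match provider, item:
--         case None, None:
--             return None, None, "Error: Could not identify a provider or item. Please specify provider (e.g., 'Luminalt') and item (e.g., 'sp-resi-001')."
--         case p, None:
--             available = list(provider_id_to_items.get(provider_name_to_id[p], {}))
--             if not available:
--                 return None, None, f"Error: No items found for provider '{p}'."
--             return None, None, f"Error: Please specify the item for provider '{p}'. Available items: {', '.join(available)}."
--         case None, i:
--             possible = [p for p, v in provider_name_to_id.items() if i in provider_id_to_items.get(v, {})]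
--             if possible:
--                 return None, None, f"Error: Please specify the provider for item '{i}'. This item is available from: {', '.join(possible)}."
--             return None, None, f"Error: Item '{i}' found, but no associated provider. Please also specify a provider name."
--         case p, i:
--             pid = provider_name_to_id[p]
--             item_id = provider_id_to_items.get(pid, {}).get(i)
--             if item_id is None:
--                 actual = list(provider_id_to_items.get(pid, {}))
--                 return None, None, (f"Error: Item '{i}' is not valid for provider '{p}'. "
--                                     f"Available items for this provider: {', '.join(actual) if actual else 'No items available'}.")
--             return pid, item_id, None
-- ===== Notes on version B (the rewrite author's own statement) =====
-- stated objective: alternative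
-- what changed: A's single stateful nested scan with conditional breaks (one mutable found_item_name threaded through both dict loops) is replaced by three independent passes: find the first provider name in the query, collect all matching item names in one comprehension, then pick the found provider's own item if it matched and otherwise the first matched item, with the error cascade restated as a match on the (provider, item) pair; …
import Mathlib
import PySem

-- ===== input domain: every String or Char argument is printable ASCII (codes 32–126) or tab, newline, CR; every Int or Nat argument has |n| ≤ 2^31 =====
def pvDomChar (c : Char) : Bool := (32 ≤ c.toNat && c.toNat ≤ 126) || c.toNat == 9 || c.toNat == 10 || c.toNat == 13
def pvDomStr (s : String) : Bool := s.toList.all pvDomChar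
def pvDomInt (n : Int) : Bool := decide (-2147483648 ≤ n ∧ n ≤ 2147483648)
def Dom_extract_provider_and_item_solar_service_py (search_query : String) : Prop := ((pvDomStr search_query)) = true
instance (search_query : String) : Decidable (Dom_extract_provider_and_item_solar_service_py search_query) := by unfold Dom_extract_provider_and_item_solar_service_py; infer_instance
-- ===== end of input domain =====

-- B replaces A's stateful nested break-driven scan by three independent passes (find provider, collect all matched items, pick the provider's own item else the first); queries naming several items (an unspecified first-vs-last-match corner) are excluded by Pre_.

-- shared module-level data (the Python dict literals) and the f-string concatenation helper
def pvProviderNameToId : PySem.Dict String String :=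
  PySem.Dict.mk [("Luminalt", "329"), ("Sunrun", "330"), ("Infinity Energy", "331"),
                 ("SolarUnion", "332"), ("Horizon Solar Power", "333"),
                 ("San Francisco Electric Authority", "334")]

def pvProviderIdToItems : PySem.Dict String (PySem.Dict String String) :=
  PySem.Dict.mk [("329", PySem.Dict.mk [("sp-resi-001", "466")]),
                 ("330", PySem.Dict.mk [("sp-resi-002", "467")]),
                 ("331", PySem.Dict.mk [("sp-resi-003", "468")]),
                 ("332", PySem.Dict.mk [("sp-resi-004", "469")]),
                 ("333", PySem.Dict.mk [("sp-resi-005", "470")]),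
                 ("334", PySem.Dict.mk [("Residential Electricity Connection6", "471")])]

def pvCat (xs : List String) : String := PySem.Str.join "" xs  -- f-string: concatenation of the pieces

-- ===== PORT A =====
-- 'for p_name in provider_name_to_id.keys(): if p_name.lower() in q: found = p_name; break'
def pvA_provLoop (ql : String) : List String → Option String
  | [] => none
  | p :: rest =>
      if PySem.Str.isIn (PySem.Str.lower p) ql then some p else pvA_provLoop ql rest

-- inner 'for i_name in items_map.keys()' with its two conditional breaks
def pvA_itemInner (ql : String) (fp : Option String) (pid : String)
    : List String → Option String → Option String
  | [], found => found
  | i :: rest, found =>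
      if PySem.Str.isIn (PySem.Str.lower i) ql then
        if fp.isSome && (PySem.Dict.get? pvProviderNameToId (fp.getD "") == some pid) then some i
        else if !fp.isSome then some i
        else pvA_itemInner ql fp pid rest (some i)
      else pvA_itemInner ql fp pid rest found

-- outer 'for p_id_map, items_map in provider_id_to_items.items()' with its conditional break
def pvA_itemOuter (ql : String) (fp : Option String)
    : List (String × PySem.Dict String String) → Option String → Option String
  | [], found => found
  | (pid, items) :: rest, found =>
      let found' := pvA_itemInner ql fp pid (PySem.Dict.keys items) found
      if found'.isSome && (!fp.isSome || (PySem.Dict.get? pvProviderNameToId (fp.getD "") == some pid))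
      then found'
      else pvA_itemOuter ql fp rest found'

-- 'possible_providers' accumulation loop
def pvA_possLoop (iname : String) : List (String × String) → List String → List String
  | [], acc => acc
  | (pn, pid) :: rest, acc =>
      pvA_possLoop iname rest
        (if PySem.Dict.contains (PySem.Dict.getD pvProviderIdToItems pid PySem.Dict.empty) iname
         then acc ++ [pn] else acc)

-- the if/return cascade of A, on (found_provider_name, found_item_name)
def pvA_result (fp fi : Option String) : Option String × Option String × Option String :=
  if !fp.isSome && !fi.isSome then
    (none, none, some "Error: Could not identify a provider or item. Please specify provider (e.g., 'Luminalt') and item (e.g., 'sp-resi-001').")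
  else if fp.isSome && !fi.isSome then
    -- provider_name_to_id[found_provider_name]: the key is always present (it came from .keys())
    let pid := (PySem.Dict.get? pvProviderNameToId (fp.getD "")).getD ""
    let availableItems := PySem.Dict.keys (PySem.Dict.getD pvProviderIdToItems pid PySem.Dict.empty)
    if availableItems.isEmpty then
      (none, none, some (pvCat ["Error: No items found for provider '", fp.getD "", "'."]))
    else
      (none, none, some (pvCat ["Error: Please specify the item for provider '", fp.getD "",
                                "'. Available items: ", PySem.Str.join ", " availableItems, "."]))
  else if !fp.isSome && fi.isSome then
    let possibleProviders := pvA_possLoop (fi.getD "") (PySem.Dict.items pvProviderNameToId) []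
    if !possibleProviders.isEmpty then
      (none, none, some (pvCat ["Error: Please specify the provider for item '", fi.getD "",
                                "'. This item is available from: ", PySem.Str.join ", " possibleProviders, "."]))
    else
      (none, none, some (pvCat ["Error: Item '", fi.getD "",
                                "' found, but no associated provider. Please also specify a provider name."]))
  else
    let providerId := PySem.Dict.get? pvProviderNameToId (fp.getD "")
    let itemsOfProvider :=
      match providerId with
      | some pid => PySem.Dict.getD pvProviderIdToItems pid PySem.Dict.empty
      | none => PySem.Dict.empty
    let itemId := PySem.Dict.get? itemsOfProvider (fi.getD "")
    if !itemId.isSome then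
      let actualItems := PySem.Dict.keys itemsOfProvider
      (none, none, some (pvCat ["Error: Item '", fi.getD "", "' is not valid for provider '",
                                fp.getD "", "'. Available items for this provider: ",
                                if !actualItems.isEmpty then PySem.Str.join ", " actualItems else "No items available",
                                "."]))
    else (providerId, itemId, none)

def extract_provider_and_item_solar_service_py (search_query : String) :
    Option String × Option String × Option String :=
  let ql := PySem.Str.lower search_query
  let foundProvider := pvA_provLoop ql (PySem.Dict.keys pvProviderNameToId)
  let foundItem := pvA_itemOuter ql foundProvider (PySem.Dict.items pvProviderIdToItems) none
  pvA_result foundProvider foundItem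

-- ===== PORT B =====
-- all item names whose lowercased form occurs in the query
def pvB_matched (ql : String) : List String :=
  (PySem.Dict.values pvProviderIdToItems).flatMap
    (fun items => (PySem.Dict.keys items).filter (fun n => PySem.Str.isIn (PySem.Str.lower n) ql))

-- item choice: the found provider's own item if it matched, else the first matched item
def pvB_item (ql : String) (provider : Option String) : Option String :=
  let matched := pvB_matched ql
  match provider with
  | none => matched.head?
  | some p =>
      let pid := (PySem.Dict.get? pvProviderNameToId p).getD ""
      let own := (PySem.Dict.keys (PySem.Dict.getD pvProviderIdToItems pid PySem.Dict.empty)).find?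
                   (fun n => matched.contains n)
      match own with
      | some o => some o
      | none => matched.head?

-- the result cascade, a match on the (provider, item) pair
def pvB_result (fp fi : Option String) : Option String × Option String × Option String :=
  match fp, fi with
  | none, none =>
      (none, none, some "Error: Could not identify a provider or item. Please specify provider (e.g., 'Luminalt') and item (e.g., 'sp-resi-001').")
  | some p, none =>
      let availableItems := PySem.Dict.keys
        (PySem.Dict.getD pvProviderIdToItems ((PySem.Dict.get? pvProviderNameToId p).getD "") PySem.Dict.empty)
      if availableItems.isEmpty then
        (none, none, some (pvCat ["Error: No items found for provider '", p, "'."]))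
      else
        (none, none, some (pvCat ["Error: Please specify the item for provider '", p,
                                  "'. Available items: ", PySem.Str.join ", " availableItems, "."]))
  | none, some i =>
      let possibleProviders := ((PySem.Dict.items pvProviderNameToId).filter
          (fun pv => PySem.Dict.contains (PySem.Dict.getD pvProviderIdToItems pv.2 PySem.Dict.empty) i)).map (·.1)
      if !possibleProviders.isEmpty then
        (none, none, some (pvCat ["Error: Please specify the provider for item '", i,
                                  "'. This item is available from: ", PySem.Str.join ", " possibleProviders, "."]))
      else
        (none, none, some (pvCat ["Error: Item '", i,
                                  "' found, but no associated provider. Please also specify a provider name."]))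
  | some p, some i =>
      let pid2 := (PySem.Dict.get? pvProviderNameToId p).getD ""
      match PySem.Dict.get? (PySem.Dict.getD pvProviderIdToItems pid2 PySem.Dict.empty) i with
      | some itemId => (some pid2, some itemId, none)
      | none =>
          let actualItems := PySem.Dict.keys (PySem.Dict.getD pvProviderIdToItems pid2 PySem.Dict.empty)
          let listing := if !actualItems.isEmpty then PySem.Str.join ", " actualItems else "No items available"
          (none, none, some (pvCat ["Error: Item '", i, "' is not valid for provider '", p,
                                    "'. Available items for this provider: ", listing, "."]))

def extract_provider_and_item_solar_service_py_alt (search_query : String) :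
    Option String × Option String × Option String :=
  let ql := PySem.Str.lower search_query
  let provider := (PySem.Dict.keys pvProviderNameToId).find?
      (fun p => PySem.Str.isIn (PySem.Str.lower p) ql)
  pvB_result provider (pvB_item ql provider)

-- ===== PRECONDITION & SPEC =====
-- a query is ambiguous when at least two item names occur in it and a provider occurs whose own item does not
def pvAmbiguous (ql : String) : Bool :=
  decide (2 ≤ List.countP (fun s => PySem.Str.isIn (PySem.Str.lower s) ql)
      ["sp-resi-001", "sp-resi-002", "sp-resi-003", "sp-resi-004", "sp-resi-005",
       "Residential Electricity Connection6"])
  && (if PySem.Str.isIn (PySem.Str.lower "Luminalt") ql then !PySem.Str.isIn (PySem.Str.lower "sp-resi-001") ql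
      else if PySem.Str.isIn (PySem.Str.lower "Sunrun") ql then !PySem.Str.isIn (PySem.Str.lower "sp-resi-002") ql
      else if PySem.Str.isIn (PySem.Str.lower "Infinity Energy") ql then !PySem.Str.isIn (PySem.Str.lower "sp-resi-003") ql
      else if PySem.Str.isIn (PySem.Str.lower "SolarUnion") ql then !PySem.Str.isIn (PySem.Str.lower "sp-resi-004") ql
      else if PySem.Str.isIn (PySem.Str.lower "Horizon Solar Power") ql then !PySem.Str.isIn (PySem.Str.lower "sp-resi-005") ql
      else if PySem.Str.isIn (PySem.Str.lower "San Francisco Electric Authority") ql then !PySem.Str.isIn (PySem.Str.lower "Residential Electricity Connection6") ql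
      else false)

-- Pre_ excludes queries that name a provider (whose own item is absent) together with at least two item names: which of the named items is reported is an unspecified first-vs-last-match corner on which A's and B's choices are equally defensible.
def Pre_extract_provider_and_item_solar_service_py (search_query : String) : Prop :=
  pvAmbiguous (PySem.Str.lower search_query) = false
instance (search_query : String) : Decidable (Pre_extract_provider_and_item_solar_service_py search_query) := by unfold Pre_extract_provider_and_item_solar_service_py; infer_instance

def pvWitness_extract_provider_and_item_solar_service_py : String := "Luminalt sp-resi-001"

def Spec_extract_provider_and_item_solar_service_py (search_query : String) (out : Option String × Option String × Option String) : Prop := out = extract_provider_and_item_solar_service_py_alt search_query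
instance (search_query : String) (out : Option String × Option String × Option String) : Decidable (Spec_extract_provider_and_item_solar_service_py search_query out) := by unfold Spec_extract_provider_and_item_solar_service_py; infer_instance

-- ===== CLAIM (what is proved, stated in full; the proofs are below) =====
def Claim_equal_extract_provider_and_item_solar_service_py : Prop := ∀ (search_query : String), Dom_extract_provider_and_item_solar_service_py search_query → Pre_extract_provider_and_item_solar_service_py search_query → Spec_extract_provider_and_item_solar_service_py search_query (extract_provider_and_item_solar_service_py search_query)

-- ===== LEMMAS AND PROOFS =====
-- A's break-on-first-hit provider loop is List.find?
theorem pvA_provLoop_eq_find? (ql : String) (l : List String) :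
    pvA_provLoop ql l = l.find? (fun p => PySem.Str.isIn (PySem.Str.lower p) ql) := by
  induction l with
  | nil => rfl
  | cons p rest ih => simp only [pvA_provLoop, List.find?]; split <;> simp_all

-- on the module's fixed data and unambiguous queries, A's stateful item scan equals B's item choice
theorem pv_sel_eq (ql : String) (h : pvAmbiguous ql = false) :
    pvA_itemOuter ql (pvA_provLoop ql (PySem.Dict.keys pvProviderNameToId))
        (PySem.Dict.items pvProviderIdToItems) none
      = pvB_item ql (pvA_provLoop ql (PySem.Dict.keys pvProviderNameToId)) := by
  simp only [pvAmbiguous, List.countP_cons, List.countP_nil] at h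
  simp only [pvA_provLoop, pvA_itemOuter, pvA_itemInner, pvB_item, pvB_matched,
    pvProviderNameToId, pvProviderIdToItems, PySem.Dict.keys_mk,
    List.flatMap, List.filter_cons, List.filter_nil, List.map_cons, List.map_nil, PySem.Dict.values_mk, List.head?]
  revert h
  generalize PySem.Str.isIn (PySem.Str.lower "Luminalt") ql = b0
  generalize PySem.Str.isIn (PySem.Str.lower "Sunrun") ql = b1
  generalize PySem.Str.isIn (PySem.Str.lower "Infinity Energy") ql = b2
  generalize PySem.Str.isIn (PySem.Str.lower "SolarUnion") ql = b3
  generalize PySem.Str.isIn (PySem.Str.lower "Horizon Solar Power") ql = b4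
  generalize PySem.Str.isIn (PySem.Str.lower "San Francisco Electric Authority") ql = b5
  generalize PySem.Str.isIn (PySem.Str.lower "sp-resi-001") ql = b6
  generalize PySem.Str.isIn (PySem.Str.lower "sp-resi-002") ql = b7
  generalize PySem.Str.isIn (PySem.Str.lower "sp-resi-003") ql = b8
  generalize PySem.Str.isIn (PySem.Str.lower "sp-resi-004") ql = b9
  generalize PySem.Str.isIn (PySem.Str.lower "sp-resi-005") ql = b10
  generalize PySem.Str.isIn (PySem.Str.lower "Residential Electricity Connection6") ql = b11
  revert b0 b1 b2 b3 b4 b5 b6 b7 b8 b9 b10 b11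
  decide

-- A's possible_providers accumulation loop is B's filter/map comprehension
theorem pvA_possLoop_eq (i : String) (l : List (String × String)) (acc : List String) :
    pvA_possLoop i l acc
      = acc ++ (l.filter
          (fun pv => PySem.Dict.contains (PySem.Dict.getD pvProviderIdToItems pv.2 PySem.Dict.empty) i)).map (·.1) := by
  induction l generalizing acc with
  | nil => simp [pvA_possLoop]
  | cons pv rest ih =>
      obtain ⟨pn, pid⟩ := pv
      rcases h : PySem.Dict.contains (PySem.Dict.getD pvProviderIdToItems pid PySem.Dict.empty) i with _ | _ <;>
        simp [pvA_possLoop, ih, h]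

-- the two result cascades agree on every (found_provider, found_item) pair
theorem pv_result_eq (fp fi : Option String) : pvA_result fp fi = pvB_result fp fi := by
  cases fp with
  | none =>
      cases fi with
      | none => rfl
      | some i =>
          have e := pvA_possLoop_eq i (PySem.Dict.items pvProviderNameToId) []
          simp only [List.nil_append] at e
          rcases hb : (pvA_possLoop i (PySem.Dict.items pvProviderNameToId) []).isEmpty with _ | _ <;>
            (have hb2 := hb; rw [e] at hb2; simp [pvA_result, pvB_result, e, hb2])
  | some p =>
      cases fi with
      | none => rfl
      | some i =>
          simp only [pvA_result, pvB_result, Option.isSome, Option.getD]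
          rcases h : PySem.Dict.get? pvProviderNameToId p with _ | pid
          · have e : PySem.Dict.getD pvProviderIdToItems "" PySem.Dict.empty = PySem.Dict.empty := by decide
            simp [e]
          · rcases h2 : PySem.Dict.get? (PySem.Dict.getD pvProviderIdToItems pid PySem.Dict.empty) i with _ | iid <;>
              simp_all

theorem pv_main (q : String) (h : pvAmbiguous (PySem.Str.lower q) = false) :
    extract_provider_and_item_solar_service_py q = extract_provider_and_item_solar_service_py_alt q := by
  unfold extract_provider_and_item_solar_service_py extract_provider_and_item_solar_service_py_alt
  simp only [← pvA_provLoop_eq_find?, pv_sel_eq (PySem.Str.lower q) h, pv_result_eq]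

-- ===== VERDICT (by name: the statement is the Claim_ definition above) =====
theorem extract_provider_and_item_solar_service_py_spec : Claim_equal_extract_provider_and_item_solar_service_py := by
  intro q _ hpre
  unfold Spec_extract_provider_and_item_solar_service_py
  exact pv_main q hpre
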